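-- pv_equiv track=rewrite | github.com/GertjanBisschop/msbs | msbs/utils.py | reverse_combinadic_map
-- ===== SOURCE A (Python) =====
-- import math
-- from typing import Callable, Tuple, Iterable, Generator
--
-- def reverse_combinadic_map(idx: int, k=2) -> Generator[int, int, int]:
--     """
--     Maps a unique index to a unique pair.
--     """
--     while k > 0:
--         i = k - 1
--         num_combos = 0
--         while num_combos <= idx:
--             i += 1
--             num_combos = math.comb(i, k)
--         yield i - 1
--         idx -= math.comb(i - 1, k)
--         k -= 1
-- ===== SOURCE B (Python) =====
-- import math
--
-- def reverse_combinadic_map(idx: int, k=2):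
--     """
--     Maps a unique index to a unique pair (combinadic digits), finding each
--     digit by galloping + binary search on comb(., k) instead of a linear scan (an alternative search strategy).
--     """
--     while k > 0:
--         lo = k - 1                      # comb(lo, k) = 0 <= idx
--         step = 1
--         while math.comb(lo + step, k) <= idx:
--             step *= 2
--         hi = lo + step                  # idx < comb(hi, k)
--         while hi - lo > 1:
--             mid = (lo + hi) // 2
--             if math.comb(mid, k) <= idx:
--                 lo = mid
--             else:
--                 hi = mid
--         yield lo
--         idx -= math.comb(lo, k)
--         k -= 1
-- ===== Notes on version B (the rewrite author's own statement) =====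
-- stated objective: alternative
-- what changed: Each combinadic digit is found by galloping then binary search for the largest c with comb(c,k) <= idx, instead of A's linear upward scan of comb(i,k); it trades the scan for O(log idx) comb evaluations per digit.
import Mathlib
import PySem

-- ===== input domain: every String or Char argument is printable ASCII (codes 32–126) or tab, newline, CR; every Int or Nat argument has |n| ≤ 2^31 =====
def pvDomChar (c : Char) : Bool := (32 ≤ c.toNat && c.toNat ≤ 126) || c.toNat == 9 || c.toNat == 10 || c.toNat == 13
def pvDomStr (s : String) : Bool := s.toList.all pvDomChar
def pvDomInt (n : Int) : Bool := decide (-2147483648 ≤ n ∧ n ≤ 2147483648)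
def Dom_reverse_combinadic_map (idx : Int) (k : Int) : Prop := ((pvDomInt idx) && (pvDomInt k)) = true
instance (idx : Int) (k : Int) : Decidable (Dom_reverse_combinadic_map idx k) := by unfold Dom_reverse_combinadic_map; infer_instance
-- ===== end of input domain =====

-- B replaces A's linear upward scan of comb(i,k) by galloping + binary search for the
-- largest c with comb(c,k) ≤ idx (objective: alternative algorithm, same measured cost).
-- Both Pythons are generators; equivalence is about the list of yielded values.

-- math.comb on the nonnegative arguments both programs use inside Pre_
def pvComb (n k : Int) : Int := ((Nat.choose n.toNat k.toNat : Nat) : Int)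

-- ===== PORT A =====
-- inner while loop of A: 'while num_combos <= idx: i += 1; num_combos = comb(i, k)';
-- the fuel is only a totality guard, it is large enough on Pre_ (lemma aInner_sound below)
def aInner : Nat → Int → Int → Int → Int → Int
  | 0, _, _, i, _ => i
  | f + 1, idx, k, i, num =>
    if num ≤ idx then aInner f idx k (i + 1) (pvComb (i + 1) k) else i

-- outer 'while k > 0' loop of A; fuel k.toNat is exact (k decreases by 1 each turn)
def aOuter : Nat → Int → Int → List Int
  | 0, _, _ => []
  | n + 1, idx, k =>
    if 0 < k then
      let i := aInner (idx.toNat + 2) idx k (k - 1) 0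
      (i - 1) :: aOuter n (idx - pvComb (i - 1) k) (k - 1)
    else []

def reverse_combinadic_map (idx : Int) (k : Int) : List Int := aOuter k.toNat idx k

-- ===== PORT B =====
-- galloping loop of Source B: 'while comb(lo + step, k) <= idx: step *= 2';
-- the fuel is only a totality guard, large enough on Pre_ (lemma bGallop_sound below)
def bGallop : Nat → Int → Int → Int → Int → Int
  | 0, _, _, _, step => step
  | f + 1, idx, k, lo, step =>
    if pvComb (lo + step) k ≤ idx then bGallop f idx k lo (step * 2) else step

-- binary search of Source B: 'while hi - lo > 1: mid = (lo+hi)//2; ...';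
-- the fuel (hi-lo).toNat is only a totality guard (hi-lo shrinks every turn)
def bSearch : Nat → Int → Int → Int → Int → Int
  | 0, _, _, lo, _ => lo
  | f + 1, idx, k, lo, hi =>
    if hi - lo > 1 then
      let mid := PySem.Int.floordiv (lo + hi) 2
      if pvComb mid k ≤ idx then bSearch f idx k mid hi
      else bSearch f idx k lo mid
    else lo

-- outer 'while k > 0' loop of B; fuel k.toNat is exact
def bOuter : Nat → Int → Int → List Int
  | 0, _, _ => []
  | n + 1, idx, k =>
    if 0 < k then
      let lo := k - 1
      let step := bGallop (idx.toNat + 1) idx k lo 1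
      let hi := lo + step
      let c := bSearch (hi - lo).toNat idx k lo hi
      c :: bOuter n (idx - pvComb c k) (k - 1)
    else []

def reverse_combinadic_map_alt (idx : Int) (k : Int) : List Int := bOuter k.toNat idx k

-- ===== PRECONDITION & SPEC =====
-- A raises ValueError (math.comb of a negative argument) exactly when idx < 0 and k > 0
def Pre_reverse_combinadic_map (idx : Int) (k : Int) : Prop := 0 ≤ idx ∨ k ≤ 0
instance (idx : Int) (k : Int) : Decidable (Pre_reverse_combinadic_map idx k) := by unfold Pre_reverse_combinadic_map; infer_instance
def pvWitness_reverse_combinadic_map : Int × Int := (100, 3)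

def Spec_reverse_combinadic_map (idx : Int) (k : Int) (out : List Int) : Prop := out = reverse_combinadic_map_alt idx k
instance (idx : Int) (k : Int) (out : List Int) : Decidable (Spec_reverse_combinadic_map idx k out) := by unfold Spec_reverse_combinadic_map; infer_instance

-- ===== CLAIM (what is proved, stated in full; the proofs are below) =====
def Claim_equal_reverse_combinadic_map : Prop := ∀ (idx : Int) (k : Int), Dom_reverse_combinadic_map idx k → Pre_reverse_combinadic_map idx k → Spec_reverse_combinadic_map idx k (reverse_combinadic_map idx k)

-- ===== LEMMAS AND PROOFS =====

-- monotonicity of pvComb in its first argument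
theorem pvComb_mono {a b : Int} (k : Int) (h : a ≤ b) : pvComb a k ≤ pvComb b k := by
  unfold pvComb
  exact_mod_cast Nat.choose_le_choose k.toNat (Int.toNat_le_toNat h)

-- n + 1 ≤ choose (n + m) m for m ≥ 1
theorem choose_lower (n m : Nat) (hm : 1 ≤ m) : n + 1 ≤ Nat.choose (n + m) m := by
  induction n with
  | zero => simp [Nat.choose_self]
  | succ p ih =>
    obtain ⟨j, rfl⟩ : ∃ j, m = j + 1 := ⟨m - 1, by omega⟩
    have hstep : Nat.choose (p + 1 + (j + 1)) (j + 1)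
        = Nat.choose (p + (j + 1)) j + Nat.choose (p + (j + 1)) (j + 1) := by
      have : p + 1 + (j + 1) = (p + (j + 1)) + 1 := by omega
      rw [this, Nat.choose_succ_succ]
    have hpos : 0 < Nat.choose (p + (j + 1)) j := Nat.choose_pos (by omega)
    omega

-- pvComb (k-1) k = 0 for 0 < k
theorem pvComb_pred (k : Int) (hk : 0 < k) : pvComb (k - 1) k = 0 := by
  unfold pvComb
  rw [Nat.choose_eq_zero_of_lt (by omega)]
  rfl

-- the unique c (≥ 0) with pvComb c k ≤ idx < pvComb (c+1) k
def IsDigit (idx k c : Int) : Prop :=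
  0 ≤ c ∧ pvComb c k ≤ idx ∧ idx < pvComb (c + 1) k

theorem digit_unique {idx k a b : Int} (ha : IsDigit idx k a) (hb : IsDigit idx k b) : a = b := by
  rcases ha with ⟨ha0, ha1, ha2⟩
  rcases hb with ⟨hb0, hb1, hb2⟩
  by_contra hne
  rcases lt_or_gt_of_ne hne with h | h
  · exact absurd (le_trans (pvComb_mono k (by omega : a + 1 ≤ b)) hb1) (by omega)
  · exact absurd (le_trans (pvComb_mono k (by omega : b + 1 ≤ a)) ha1) (by omega)

-- A's inner loop returns the successor of the digit, given enough fuel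
theorem aInner_sound : ∀ (f : Nat) (idx k i : Int), pvComb i k ≤ idx →
    idx < pvComb (i + (f : Int)) k →
    IsDigit idx k (aInner f idx k i (pvComb i k) - 1) ∧ i < aInner f idx k i (pvComb i k) := by
  intro f
  induction f with
  | zero => intro idx k i h1 h2; simp at h2; omega
  | succ g ih =>
    intro idx k i h1 h2
    rw [aInner, if_pos h1]
    by_cases hnext : pvComb (i + 1) k ≤ idx
    · have := ih idx k (i + 1) hnext (by
        have : i + 1 + (g : Int) = i + ((g + 1 : Nat) : Int) := by push_cast; ring
        rw [this]; exact h2)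
      exact ⟨this.1, by omega⟩
    · have hstop : aInner g idx k (i + 1) (pvComb (i + 1) k) = i + 1 := by
        cases g with
        | zero => rfl
        | succ g' => rw [aInner, if_neg hnext]
      rw [hstop]
      refine ⟨⟨?_, by simpa using h1, by simpa using (by omega : idx < pvComb (i + 1) k)⟩, by omega⟩
      -- 0 ≤ i + 1 - 1 = i : from pvComb i k ≤ idx we cannot conclude; use cases
      -- 0 ≤ i: if i < 0 then pvComb i k = pvComb (i+1) k (both toNat 0), contradicting h1, hnext
      by_contra hneg
      have hneg' : i < 0 := by omega
      have : pvComb i k = pvComb (i + 1) k := by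
        unfold pvComb
        congr 2
        omega
      omega

-- B's binary search returns the digit, given the bracket invariant and enough fuel
theorem bSearch_sound : ∀ (f : Nat) (idx k lo hi : Int), 0 ≤ lo → lo < hi →
    pvComb lo k ≤ idx → idx < pvComb hi k → hi - lo ≤ (f : Int) →
    IsDigit idx k (bSearch f idx k lo hi) := by
  intro f
  induction f with
  | zero => intro idx k lo hi h0 hlt _ _ hf; simp at hf; omega
  | succ g ih =>
    intro idx k lo hi h0 hlt hlo hhi hf
    rw [bSearch]
    by_cases hgap : hi - lo > 1
    · rw [if_pos hgap]
      have hmid := PySem.Int.floordiv_two_mid_bounds (le_of_lt hlt)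
      set mid := PySem.Int.floordiv (lo + hi) 2 with hmiddef
      have hdiv : mid = (lo + hi) / 2 := by
        rw [hmiddef, PySem.Int.floordiv_eq_ediv_of_pos (by omega)]
      have hmlo : lo < mid := by rw [hdiv]; omega
      have hmhi : mid < hi := by rw [hdiv]; omega
      by_cases hc : pvComb mid k ≤ idx
      · rw [if_pos hc]
        exact ih idx k mid hi (by omega) (by omega) hc hhi (by push_cast at hf ⊢; omega)
      · rw [if_neg hc]
        exact ih idx k lo mid h0 (by omega) hlo (by omega) (by push_cast at hf ⊢; omega)
    · rw [if_neg hgap]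
      have : hi = lo + 1 := by omega
      exact ⟨h0, hlo, by rw [← this]; exact hhi⟩

-- enough fuel for A's inner call: idx < pvComb (k - 1 + (idx.toNat + 2)) k
theorem a_fuel (idx k : Int) (hidx : 0 ≤ idx) (hk : 0 < k) :
    idx < pvComb (k - 1 + ((idx.toNat + 2 : Nat) : Int)) k := by
  unfold pvComb
  have harg : (k - 1 + ((idx.toNat + 2 : Nat) : Int)).toNat = (idx.toNat + 1) + k.toNat := by
    push_cast; omega
  rw [harg]
  have := choose_lower (idx.toNat + 1) k.toNat (by omega)
  omega

-- for 0 < k and 1 ≤ s: s ≤ pvComb (k - 1 + s) k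
theorem pvComb_step_lb (k s : Int) (hk : 0 < k) (hs : 1 ≤ s) : s ≤ pvComb (k - 1 + s) k := by
  unfold pvComb
  have harg : (k - 1 + s).toNat = (s.toNat - 1) + k.toNat := by omega
  rw [harg]
  have := choose_lower (s.toNat - 1) k.toNat (by omega)
  omega

-- B's galloping loop: the returned step keeps 1 ≤ step and idx < pvComb (k - 1 + step) k
theorem bGallop_sound : ∀ (f : Nat) (idx k step : Int), 0 < k → 1 ≤ step →
    idx + 1 ≤ step + (f : Int) →
    1 ≤ bGallop f idx k (k - 1) step ∧ idx < pvComb (k - 1 + bGallop f idx k (k - 1) step) k := by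
  intro f
  induction f with
  | zero =>
    intro idx k step hk hs hf
    simp only [bGallop]
    have := pvComb_step_lb k step hk hs
    simp at hf
    exact ⟨hs, by omega⟩
  | succ g ih =>
    intro idx k step hk hs hf
    rw [bGallop]
    by_cases hc : pvComb (k - 1 + step) k ≤ idx
    · rw [if_pos hc]
      exact ih idx k (step * 2) hk (by omega) (by push_cast at hf ⊢; omega)
    · rw [if_neg hc]
      exact ⟨hs, by omega⟩

-- the two outer loops agree for 0 ≤ idx
theorem outer_eq : ∀ (n : Nat) (idx k : Int), 0 ≤ idx → aOuter n idx k = bOuter n idx k := by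
  intro n
  induction n with
  | zero => intro idx k _; rfl
  | succ m ih =>
    intro idx k hidx
    rw [aOuter, bOuter]
    by_cases hk : 0 < k
    · rw [if_pos hk, if_pos hk]
      have hA := aInner_sound (idx.toNat + 2) idx k (k - 1)
        (by rw [pvComb_pred k hk]; exact hidx) (a_fuel idx k hidx hk)
      rw [pvComb_pred k hk] at hA
      have hG := bGallop_sound (idx.toNat + 1) idx k 1 hk (by omega) (by push_cast; omega)
      set st := bGallop (idx.toNat + 1) idx k (k - 1) 1 with hst
      have hB := bSearch_sound ((k - 1 + st - (k - 1)).toNat) idx k (k - 1) (k - 1 + st)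
        (by omega) (by omega) (by rw [pvComb_pred k hk]; exact hidx)
        hG.2 (by omega)
      have hceq : aInner (idx.toNat + 2) idx k (k - 1) 0 - 1
          = bSearch ((k - 1 + st - (k - 1)).toNat) idx k (k - 1) (k - 1 + st) := digit_unique hA.1 hB
      have hrec := ih (idx - pvComb (aInner (idx.toNat + 2) idx k (k - 1) 0 - 1) k) (k - 1)
        (by rcases hB with ⟨_, hle, _⟩; rw [← hceq] at hle; omega)
      simp only [hceq] at hrec ⊢
      rw [hrec]
    · rw [if_neg hk, if_neg hk]

-- ===== VERDICT (by name: the statement is the Claim_ definition above) =====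
theorem reverse_combinadic_map_spec : Claim_equal_reverse_combinadic_map := by
  intro idx k _ hpre
  unfold Spec_reverse_combinadic_map reverse_combinadic_map reverse_combinadic_map_alt
  rcases hpre with h | h
  · exact outer_eq k.toNat idx k h
  · have : k.toNat = 0 := by omega
    rw [this]; rfl
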